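-- pv_equiv track=rewrite | github.com/NathanPosthumus/Reverse-hash-.py | hash.py | make_prefixes
-- ===== SOURCE A (Python) =====
-- def make_prefixes(charset, workers):
--     # Create a list of prefixes to split the keyspace; try single-letter prefixes first
--     # If more workers than charset length, use two-letter prefixes.
--     if workers <= 1:
--         return ['']
--     L = len(charset)
--     prefixes = [c for c in charset]
--     if len(prefixes) >= workers:
--         return prefixes[:workers]
--     # need more prefixes: use 2-letter combos
--     prefixes = []
--     for a in charset:
--         for b in charset:
--             prefixes.append(a + b)
--             if len(prefixes) >= workers:
--                 return prefixes
--     return prefixes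
-- ===== SOURCE B (Python) =====
-- def make_prefixes(charset, workers):
--     if workers <= 1:
--         return ['']
--     L = len(charset)
--     if L >= workers:
--         return list(charset[:workers])
--     if L == 0:
--         return []
--     # Block construction: one divmod determines how many FULL rows of the
--     # pair table are needed and the size of the partial last row; whole rows
--     # are emitted at once instead of counting element by element.
--     n = min(workers, L * L)
--     q, r = divmod(n, L)
--     full = [a + b for a in charset[:q] for b in charset]
--     if r:
--         full += [charset[q] + b for b in charset[:r]]
--     return full
-- ===== Notes on version B (the rewrite author's own statement) =====
-- stated objective: alternative
-- what changed: Instead of A's nested per-element loops with a running counter and early return, B computes with one divmod how many full rows of the pair table are needed (q) and the size of the partial last row (r), then emits the q full rows in one comprehension and appends the single partial row.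
import Mathlib
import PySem

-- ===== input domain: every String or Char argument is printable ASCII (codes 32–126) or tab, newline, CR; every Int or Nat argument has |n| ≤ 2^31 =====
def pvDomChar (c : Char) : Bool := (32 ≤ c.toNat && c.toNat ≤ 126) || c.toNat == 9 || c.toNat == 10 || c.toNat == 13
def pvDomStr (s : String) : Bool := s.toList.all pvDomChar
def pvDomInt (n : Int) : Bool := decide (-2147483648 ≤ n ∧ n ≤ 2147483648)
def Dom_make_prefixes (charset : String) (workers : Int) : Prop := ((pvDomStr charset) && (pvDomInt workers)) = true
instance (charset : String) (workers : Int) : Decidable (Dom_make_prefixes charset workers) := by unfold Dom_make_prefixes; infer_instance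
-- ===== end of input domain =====

-- B replaces A's element-by-element nested counting loops by block construction:
-- one divmod gives the number of full rows and the partial-row size; objective: alternative.

-- ===== PORT A =====
-- Nested 'for a in charset: for b in charset:' with append and early 'return' once
-- len(prefixes) >= workers: iterated as a recursion over the ordered list of (a, b) pairs.
def pairsLoopA (ps : List (Char × Char)) (workers : Int) (acc : List String) : List String :=
  match ps with
  | [] => acc
  | (a, b) :: rest =>
      let acc' := acc ++ [String.ofList [a, b]]
      if (acc'.length : Int) ≥ workers then acc' else pairsLoopA rest workers acc'

def make_prefixes (charset : String) (workers : Int) : List String :=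
  if workers ≤ 1 then [""]
  else
    let prefixes := charset.toList.map (fun c => String.ofList [c])
    if (prefixes.length : Int) ≥ workers then
      PySem.List.slice prefixes none (some workers)
    else
      pairsLoopA (charset.toList.flatMap (fun a => charset.toList.map (fun b => (a, b)))) workers []

-- ===== PORT B =====
-- charset[q] is only read when r ≠ 0, which forces q < L, so pyGetD's default is never used.
def make_prefixes_alt (charset : String) (workers : Int) : List String :=
  if workers ≤ 1 then [""]
  else
    let cs := charset.toList
    let L : Int := cs.length
    if L ≥ workers then
      (PySem.List.slice cs none (some workers)).map (fun c => String.ofList [c])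
    else if L = 0 then []
    else
      let n : Int := min workers (L * L)
      let q : Int := PySem.Int.floordiv n L
      let r : Int := PySem.Int.mod n L
      let full := (PySem.List.slice cs none (some q)).flatMap
        (fun a => cs.map (fun b => String.ofList [a, b]))
      if r ≠ 0 then
        full ++ (PySem.List.slice cs none (some r)).map
          (fun b => String.ofList [PySem.List.pyGetD cs q ' ', b])
      else full

-- ===== PRECONDITION & SPEC =====
def Spec_make_prefixes (charset : String) (workers : Int) (out : List String) : Prop := out = make_prefixes_alt charset workers
instance (charset : String) (workers : Int) (out : List String) : Decidable (Spec_make_prefixes charset workers out) := by unfold Spec_make_prefixes; infer_instance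

-- ===== CLAIM (what is proved, stated in full; the proofs are below) =====
def Claim_equal_make_prefixes : Prop := ∀ (charset : String) (workers : Int), Dom_make_prefixes charset workers → Spec_make_prefixes charset workers (make_prefixes charset workers)

-- ===== LEMMAS AND PROOFS =====

-- A's counting loop takes exactly the next (w - |acc|) pairs.
lemma pairsLoopA_eq (ps : List (Char × Char)) (w : Int) :
    ∀ acc : List String, (acc.length : Int) < w →
      pairsLoopA ps w acc = acc ++ (ps.take (w - acc.length).toNat).map (fun p => String.ofList [p.1, p.2]) := by
  induction ps with
  | nil => intro acc _; simp [pairsLoopA]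
  | cons p rest ih =>
    intro acc hlt
    obtain ⟨a, b⟩ := p
    simp only [pairsLoopA]
    by_cases hge : ((acc ++ [String.ofList [a, b]]).length : Int) ≥ w
    · simp only [hge, if_pos]
      have : (w - acc.length).toNat = 1 := by
        simp [List.length_append] at hge; omega
      simp [this]
    · simp only [hge, if_neg, not_false_iff]
      rw [ih _ (by simp at hge ⊢; omega)]
      have h1 : (w - ((acc ++ [String.ofList [a, b]]).length : Int)).toNat
          = (w - acc.length).toNat - 1 := by simp [List.length_append]; omega
      have h2 : (w - (acc.length : Int)).toNat = ((w - acc.length).toNat - 1) + 1 := by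
        simp at hge; omega
      rw [h1, h2]
      simp [List.take_succ_cons]

lemma blocks_length {α β : Type} (xs ys : List α) (g : α → α → β) :
    (xs.flatMap fun a => ys.map (g a)).length = xs.length * ys.length := by
  induction xs <;> simp [*, Nat.succ_mul, Nat.add_comm]

-- Taking q·|ys| + r elements of the row-major table = q full rows plus a partial row.
lemma take_blocks {α β : Type} (ys : List α) (g : α → α → β) :
    ∀ (xs : List α) (q r : Nat), r ≤ ys.length →
      ((xs.flatMap fun a => ys.map (g a)).take (q * ys.length + r))
        = ((xs.take q).flatMap fun a => ys.map (g a))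
          ++ (((xs.drop q).take (min r 1)).flatMap fun a => (ys.take r).map (g a)) := by
  intro xs
  induction xs with
  | nil => intro q r _; simp
  | cons x xs' ih =>
    intro q r hr
    cases q with
    | zero =>
        simp only [Nat.zero_mul, Nat.zero_add, List.take_zero, List.drop_zero,
          List.flatMap_nil, List.nil_append, List.flatMap_cons]
        cases r with
        | zero => simp
        | succ r' =>
            rw [List.take_append_of_le_length (by simpa using hr)]
            simp [List.map_take]
    | succ q' =>
        simp only [List.flatMap_cons, Nat.succ_mul]
        rw [show (q' * ys.length + ys.length) + r = ys.length + (q' * ys.length + r) by omega,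
          List.take_append, List.take_of_length_le (by simp), List.take_succ_cons,
          List.flatMap_cons, List.drop_succ_cons, List.length_map,
          Nat.add_sub_cancel_left, ih q' r hr]
        simp [List.append_assoc]

-- ===== VERDICT (by name: the statement is the Claim_ definition above) =====
theorem make_prefixes_spec : Claim_equal_make_prefixes := by
  intro charset workers _
  unfold Spec_make_prefixes make_prefixes make_prefixes_alt
  by_cases h1 : workers ≤ 1
  · simp only [if_pos h1]
  · simp only [h1, if_neg, not_false_iff]
    push_neg at h1
    set cs := charset.toList with hcs
    have hw0 : 0 ≤ workers := by omega
    by_cases h2 : ((cs.length : Int)) ≥ workers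
    · have h2' : ((cs.map (fun c => String.ofList [c])).length : Int) ≥ workers := by
        simpa using h2
      simp only [h2, h2', if_pos]
      rw [PySem.List.slice_to _ hw0, PySem.List.slice_to _ hw0, List.map_take]
    · have h2' : ¬ ((cs.map (fun c => String.ofList [c])).length : Int) ≥ workers := by
        simpa using h2
      simp only [h2, h2', if_neg, not_false_iff]
      push_neg at h2
      rcases Nat.eq_zero_or_pos cs.length with hL0 | hL0
      · have hnil : cs = [] := List.eq_nil_of_length_eq_zero hL0
        rw [hnil]
        simp [pairsLoopA]
      · have hLne : ¬ ((cs.length : Int) = 0) := by omega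
        simp only [hLne, if_neg, not_false_iff]
        -- Nat-level data
        set len := cs.length with hlen
        set nN : Nat := min workers.toNat (len * len) with hnN
        have hnle : nN ≤ len * len := Nat.min_le_right _ _
        have hcastn : min workers ((len : Int) * len) = (nN : Int) := by
          have : ((len * len : Nat) : Int) = (len : Int) * len := by push_cast; ring
          rw [hnN]; push_cast; omega
        have hq : PySem.Int.floordiv (nN : Int) (len : Int)
            = ((nN / len : Nat) : Int) := PySem.Int.floordiv_natCast nN len
        have hr : PySem.Int.mod (nN : Int) (len : Int)
            = ((nN % len : Nat) : Int) := PySem.Int.mod_natCast nN len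
        set q := nN / len with hqdef
        set r := nN % len with hrdef
        have hqr : q * len + r = nN := by
          have h := Nat.div_add_mod nN len; rw [Nat.mul_comm] at h; exact h
        have hrlt : r < len := Nat.mod_lt _ hL0
        -- A side
        rw [pairsLoopA_eq _ _ [] (by simp; omega)]
        simp only [List.nil_append, List.length_nil, Nat.cast_zero, Int.sub_zero]
        have hmapflat :
            ((cs.flatMap fun a => cs.map fun b => (a, b)).map
              (fun p => String.ofList [p.1, p.2]))
            = cs.flatMap fun a => cs.map (fun b => String.ofList [a, b]) := by
          simp [List.map_flatMap, List.map_map, Function.comp_def]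
        rw [List.map_take, hmapflat]
        -- take workers.toNat = take nN (clamped by the table length)
        have htake : ((cs.flatMap fun a => cs.map (fun b => String.ofList [a, b])).take workers.toNat)
            = ((cs.flatMap fun a => cs.map (fun b => String.ofList [a, b])).take nN) := by
          by_cases hbig : workers.toNat ≤ len * len
          · have : nN = workers.toNat := by omega
            rw [this]
          · push_neg at hbig
            have hlenp : (cs.flatMap fun a => cs.map (fun b => String.ofList [a, b])).length
                = len * len := by rw [blocks_length]
            rw [List.take_of_length_le (by omega), List.take_of_length_le (by omega)]
        rw [htake, show nN = q * len + r from hqr.symm,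
          take_blocks cs (fun a b => String.ofList [a, b]) cs q r (le_of_lt hrlt)]
        -- B side
        rw [hcastn, hq, hr,
          PySem.List.slice_to _ (by positivity), PySem.List.slice_to _ (by positivity)]
        simp only [Int.toNat_natCast]
        by_cases hrz : r = 0
        · simp [hrz]
        · have hrzi : ((r : Int)) ≠ 0 := by exact_mod_cast hrz
          simp only [hrzi, if_pos, ne_eq, not_false_iff]
          have hmin1 : min r 1 = 1 := by omega
          have hqlt : q < len := by
            by_contra hc
            push_neg at hc
            have : len * len ≤ q * len := Nat.mul_le_mul_right _ hc
            omega
          have hdrop : (cs.drop q).take 1 = [cs[q]'(by omega)] := by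
            simp [List.take_one, List.head?_drop,
              List.getElem?_eq_getElem (show q < cs.length by omega)]
          rw [hmin1, hdrop]
          simp only [List.flatMap_cons, List.flatMap_nil, List.append_nil]
          congr 1
          apply List.map_congr_left
          intro b _
          congr 2
          rw [PySem.List.pyGetD_natCast]
          simp [List.getD_eq_getElem?_getD, List.getElem?_eq_getElem (by omega : q < cs.length)]
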